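-- pv_equiv track=rewrite | github.com/dolonet/wagstaff-chebyshev | scripts/primitive_divisor_survey.py | U_mod
-- ===== SOURCE A (Python) =====
-- def U_mod(n, m):
--     """Pell U_n mod m via matrix exponentiation."""
--     if m == 1 or n <= 0:
--         return 0
--     def mm(A, B):
--         return [[(A[0][0]*B[0][0]+A[0][1]*B[1][0]) % m,
--                  (A[0][0]*B[0][1]+A[0][1]*B[1][1]) % m],
--                 [(A[1][0]*B[0][0]+A[1][1]*B[1][0]) % m,
--                  (A[1][0]*B[0][1]+A[1][1]*B[1][1]) % m]]
--     R = [[1, 0], [0, 1]]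
--     B = [[2, 1], [1, 0]]
--     e = n - 1
--     while e > 0:
--         if e & 1:
--             R = mm(R, B)
--         B = mm(B, B)
--         e >>= 1
--     return R[0][0] % m
-- ===== SOURCE B (Python) =====
-- def U_mod(n, m):
--     """Pell U_n mod m by recursive fast doubling on the scalar pair (U_k, U_{k+1})."""
--     if m == 1 or n <= 0:
--         return 0
--     def fd(k):
--         # returns (U_k % m-class, U_{k+1} % m-class)
--         if k == 0:
--             return (0, 1)
--         a, b = fd(k // 2)
--         c = (2 * a * (b - a)) % m       # U_{2j} = 2*U_j*(U_{j+1} - U_j)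
--         d = (a * a + b * b) % m         # U_{2j+1} = U_j^2 + U_{j+1}^2
--         if k & 1:
--             return (d, (2 * d + c) % m)
--         return (c, d)
--     return fd(n)[0] % m
-- ===== Notes on version B (the rewrite author's own statement) =====
-- stated objective: alternative
-- what changed: Replaces A's 2x2 companion-matrix binary exponentiation (identity accumulator, matrix squaring) with recursive fast doubling on the scalar pair (U_k, U_{k+1}) using the Pell identities U_2j = 2*U_j*(U_{j+1}-U_j) and U_2j+1 = U_j^2 + U_{j+1}^2.
import Mathlib
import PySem

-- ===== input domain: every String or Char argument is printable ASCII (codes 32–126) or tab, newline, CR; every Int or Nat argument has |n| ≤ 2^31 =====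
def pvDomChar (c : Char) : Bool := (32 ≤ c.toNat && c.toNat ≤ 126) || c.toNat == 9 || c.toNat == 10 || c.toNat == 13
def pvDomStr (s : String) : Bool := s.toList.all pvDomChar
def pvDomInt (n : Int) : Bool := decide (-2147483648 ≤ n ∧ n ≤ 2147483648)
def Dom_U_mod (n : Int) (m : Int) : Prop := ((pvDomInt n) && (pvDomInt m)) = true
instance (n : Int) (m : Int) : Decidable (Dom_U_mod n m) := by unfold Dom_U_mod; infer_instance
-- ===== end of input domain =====

-- B replaces A's 2x2-matrix binary exponentiation by scalar fast doubling on the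
-- pair of consecutive Pell terms (U_k, U_{k+1}) mod m (objective: alternative).

-- ===== PORT A =====
-- 2x2 matrices as nested pairs ((r00, r01), (r10, r11))
def pvMM (m : Int) (A B : (Int × Int) × (Int × Int)) : (Int × Int) × (Int × Int) :=
  ((PySem.Int.mod (A.1.1 * B.1.1 + A.1.2 * B.2.1) m,
    PySem.Int.mod (A.1.1 * B.1.2 + A.1.2 * B.2.2) m),
   (PySem.Int.mod (A.2.1 * B.1.1 + A.2.2 * B.2.1) m,
    PySem.Int.mod (A.2.1 * B.1.2 + A.2.2 * B.2.2) m))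

-- the `while e > 0` loop of A; `e & 1` is PySem.Int.band, `e >>= 1` is floor division by 2
def pvALoop (m : Int) (R B : (Int × Int) × (Int × Int)) (e : Int) :
    (Int × Int) × (Int × Int) :=
  if _h : 0 < e then
    pvALoop m (if PySem.Int.band e 1 ≠ 0 then pvMM m R B else R) (pvMM m B B)
      (PySem.Int.floordiv e 2)
  else R
termination_by e.toNat
decreasing_by
  simp only [PySem.Int.floordiv_eq_ediv_of_pos (by norm_num : (0:Int) < 2)]
  omega

def U_mod (n : Int) (m : Int) : Int :=
  if m = 1 ∨ n ≤ 0 then 0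
  else PySem.Int.mod (pvALoop m ((1, 0), (0, 1)) ((2, 1), (1, 0)) (n - 1)).1.1 m

-- ===== PORT B =====
-- the recursive helper fd of B: returns the pair (U_k, U_{k+1}) reduced mod m;
-- `k // 2` is Nat division (k ≥ 0 here), `k & 1` is the low bit, i.e. k % 2
def pvFD (m : Int) (k : Nat) : Int × Int :=
  if _h : k = 0 then (0, 1)
  else
    let p := pvFD m (k / 2)
    let c := PySem.Int.mod (2 * p.1 * (p.2 - p.1)) m
    let d := PySem.Int.mod (p.1 * p.1 + p.2 * p.2) m
    if k % 2 = 1 then (d, PySem.Int.mod (2 * d + c) m) else (c, d)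
termination_by k
decreasing_by exact Nat.div_lt_self (by omega) (by norm_num)

def U_mod_alt (n : Int) (m : Int) : Int :=
  if m = 1 ∨ n ≤ 0 then 0
  else PySem.Int.mod (pvFD m n.toNat).1 m

-- ===== PRECONDITION & SPEC =====
-- Both A and B raise ZeroDivisionError when m = 0 and n > 0 (the first `% m`); Pre_ excludes exactly that.
def Pre_U_mod (n : Int) (m : Int) : Prop := m ≠ 0 ∨ n ≤ 0
instance (n : Int) (m : Int) : Decidable (Pre_U_mod n m) := by unfold Pre_U_mod; infer_instance
def pvWitness_U_mod : Int × Int := (5, 7)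

def Spec_U_mod (n : Int) (m : Int) (out : Int) : Prop := out = U_mod_alt n m
instance (n : Int) (m : Int) (out : Int) : Decidable (Spec_U_mod n m out) := by unfold Spec_U_mod; infer_instance

-- ===== CLAIM (what is proved, stated in full; the proofs are below) =====
def Claim_equal_U_mod : Prop := ∀ (n : Int) (m : Int), Dom_U_mod n m → Pre_U_mod n m → Spec_U_mod n m (U_mod n m)

-- ===== LEMMAS AND PROOFS =====

-- the pure Pell sequence U_k
def pellU : Nat → Int
  | 0 => 0
  | 1 => 1
  | k + 2 => 2 * pellU (k + 1) + pellU k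

-- Python `x % m` leaves the congruence class of x mod m
lemma pymod_modEq (x m : Int) : PySem.Int.mod x m ≡ x [ZMOD m] := by
  show Int.fmod x m ≡ x [ZMOD m]
  rw [Int.fmod_eq_emod]
  split_ifs with h
  · show (x % m + 0) % m = x % m
    rw [Int.add_zero]
    exact Int.emod_emod_of_dvd x dvd_rfl
  · show (x % m + m) % m = x % m
    rw [Int.add_emod_right]
    exact Int.emod_emod_of_dvd x dvd_rfl

-- congruent numbers have the same Python remainder
lemma pymod_congr {x y m : Int} (h : x ≡ y [ZMOD m]) :
    PySem.Int.mod x m = PySem.Int.mod y m := by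
  show Int.fmod x m = Int.fmod y m
  have hx : x % m = y % m := h
  rw [Int.fmod_eq_emod, Int.fmod_eq_emod, hx]
  have hdvd : (m ∣ x) ↔ (m ∣ y) := by
    rw [Int.dvd_iff_emod_eq_zero, Int.dvd_iff_emod_eq_zero, hx]
  by_cases h0 : 0 ≤ m <;> simp [h0, hdvd]

-- pure 2x2 matrix algebra
def matMul (X Y : (Int × Int) × (Int × Int)) : (Int × Int) × (Int × Int) :=
  ((X.1.1 * Y.1.1 + X.1.2 * Y.2.1, X.1.1 * Y.1.2 + X.1.2 * Y.2.2),
   (X.2.1 * Y.1.1 + X.2.2 * Y.2.1, X.2.1 * Y.1.2 + X.2.2 * Y.2.2))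

def matPow (X : (Int × Int) × (Int × Int)) : Nat → (Int × Int) × (Int × Int)
  | 0 => ((1, 0), (0, 1))
  | k + 1 => matMul (matPow X k) X

lemma matMul_assoc (X Y Z : (Int × Int) × (Int × Int)) :
    matMul (matMul X Y) Z = matMul X (matMul Y Z) := by
  simp only [matMul, Prod.mk.injEq]
  refine ⟨⟨by ring, by ring⟩, by ring, by ring⟩

lemma matMul_one (X : (Int × Int) × (Int × Int)) : matMul X ((1, 0), (0, 1)) = X := by
  simp [matMul]

lemma one_matMul (X : (Int × Int) × (Int × Int)) : matMul ((1, 0), (0, 1)) X = X := by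
  simp [matMul]

lemma matMul_matPow (X : (Int × Int) × (Int × Int)) (k : Nat) :
    matMul X (matPow X k) = matPow X (k + 1) := by
  induction k with
  | zero => simp [matPow, matMul_one, one_matMul]
  | succ k ih =>
    rw [matPow, ← matMul_assoc, ih]
    rfl

lemma matPow_sq (X : (Int × Int) × (Int × Int)) (k : Nat) :
    matPow (matMul X X) k = matPow X (2 * k) := by
  induction k with
  | zero => rfl
  | succ k ih =>
    have h2 : 2 * (k + 1) = 2 * k + 1 + 1 := by omega
    rw [matPow, ih, h2, matPow, matPow, matMul_assoc]

-- entrywise congruence of matrices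
def MCong (m : Int) (X Y : (Int × Int) × (Int × Int)) : Prop :=
  X.1.1 ≡ Y.1.1 [ZMOD m] ∧ X.1.2 ≡ Y.1.2 [ZMOD m] ∧
  X.2.1 ≡ Y.2.1 [ZMOD m] ∧ X.2.2 ≡ Y.2.2 [ZMOD m]

lemma MCong_refl (m : Int) (X : (Int × Int) × (Int × Int)) : MCong m X X :=
  ⟨Int.ModEq.refl _, Int.ModEq.refl _, Int.ModEq.refl _, Int.ModEq.refl _⟩

lemma mm_cong {m : Int} {X X' Y Y' : (Int × Int) × (Int × Int)}
    (hX : MCong m X X') (hY : MCong m Y Y') : MCong m (pvMM m X Y) (matMul X' Y') := by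
  obtain ⟨x1, x2, x3, x4⟩ := hX
  obtain ⟨y1, y2, y3, y4⟩ := hY
  exact ⟨(pymod_modEq _ _).trans ((x1.mul y1).add (x2.mul y3)),
         (pymod_modEq _ _).trans ((x1.mul y2).add (x2.mul y4)),
         (pymod_modEq _ _).trans ((x3.mul y1).add (x4.mul y3)),
         (pymod_modEq _ _).trans ((x3.mul y2).add (x4.mul y4))⟩

-- the binary-exponentiation loop computes R' * B'^e up to congruence
lemma aloop_spec (m : Int) (k : Nat) : ∀ (e : Int), e.toNat = k →
    ∀ R B R' B', MCong m R R' → MCong m B B' →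
    MCong m (pvALoop m R B e) (matMul R' (matPow B' e.toNat)) := by
  induction k using Nat.strong_induction_on with
  | _ k ih =>
    intro e he R B R' B' hR hB
    rw [pvALoop]
    split_ifs with hpos hb
    · -- e > 0, low bit set
      have hfd : PySem.Int.floordiv e 2 = e / 2 :=
        PySem.Int.floordiv_eq_ediv_of_pos (by norm_num)
      have hband : PySem.Int.band e 1 = e % 2 := by
        rw [PySem.Int.band_one, PySem.Int.mod_eq_emod_of_pos (by norm_num)]
      have hlt : (PySem.Int.floordiv e 2).toNat < k := by rw [hfd]; omega
      have hodd : e % 2 = 1 := by rw [hband] at hb; omega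
      have step := ih _ hlt (PySem.Int.floordiv e 2) rfl (pvMM m R B) (pvMM m B B)
        (matMul R' B') (matMul B' B') (mm_cong hR hB) (mm_cong hB hB)
      rw [hfd, matPow_sq] at step
      have hnn : e.toNat = 2 * (e / 2).toNat + 1 := by omega
      rw [hfd, hnn, ← matMul_matPow, ← matMul_assoc]
      exact step
    · -- e > 0, low bit clear
      have hfd : PySem.Int.floordiv e 2 = e / 2 :=
        PySem.Int.floordiv_eq_ediv_of_pos (by norm_num)
      have hband : PySem.Int.band e 1 = e % 2 := by
        rw [PySem.Int.band_one, PySem.Int.mod_eq_emod_of_pos (by norm_num)]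
      have hlt : (PySem.Int.floordiv e 2).toNat < k := by rw [hfd]; omega
      have heven : e % 2 = 0 := by rw [hband] at hb; omega
      have step := ih _ hlt (PySem.Int.floordiv e 2) rfl R (pvMM m B B)
        R' (matMul B' B') hR (mm_cong hB hB)
      rw [hfd, matPow_sq] at step
      have hnn : e.toNat = 2 * (e / 2).toNat := by omega
      rw [hfd, hnn]
      exact step
    · have h0 : e.toNat = 0 := by omega
      rw [h0, show matPow B' 0 = ((1, 0), (0, 1)) from rfl, matMul_one]
      exact hR

-- B_0^k is the matrix of Pell numbers
lemma matPow_pell (k : Nat) :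
    matPow ((2, 1), (1, 0)) k =
      ((pellU (k + 1), pellU k), (pellU k, pellU (k + 1) - 2 * pellU k)) := by
  induction k with
  | zero => simp [matPow, pellU]
  | succ k ih =>
    have hrec : pellU (k + 2) = 2 * pellU (k + 1) + pellU k := rfl
    rw [matPow, ih]
    simp only [matMul, Prod.mk.injEq]
    refine ⟨⟨?_, by ring⟩, ⟨?_, ?_⟩⟩
    · rw [show k + 1 + 1 = k + 2 from rfl, hrec]; ring
    · ring
    · rw [show k + 1 + 1 = k + 2 from rfl, hrec]; ring

lemma matPow_add (X : (Int × Int) × (Int × Int)) (a b : Nat) :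
    matPow X (a + b) = matMul (matPow X a) (matPow X b) := by
  induction b with
  | zero => rw [Nat.add_zero, matPow, matMul_one]
  | succ b ih => rw [show a + (b + 1) = (a + b) + 1 by omega, matPow, ih, matPow, matMul_assoc]

-- Pell addition formulas, read off the entries of B_0^(j+k) = B_0^j * B_0^k
lemma pellU_add (j k : Nat) :
    pellU (j + k) = pellU (j + 1) * pellU k + pellU j * (pellU (k + 1) - 2 * pellU k) := by
  have h := congrArg (fun X => X.1.2) (matPow_add ((2, 1), (1, 0)) j k)
  simpa [matPow_pell, matMul] using h

lemma pellU_add_one (j k : Nat) :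
    pellU (j + k + 1) = pellU (j + 1) * pellU (k + 1) + pellU j * pellU k := by
  have h := congrArg (fun X => X.1.1) (matPow_add ((2, 1), (1, 0)) j k)
  simpa [matPow_pell, matMul] using h

-- B's fast-doubling helper returns (U_k, U_{k+1}) up to congruence mod m
lemma fd_spec (m : Int) (N : Nat) : ∀ (k : Nat), k = N →
    (pvFD m k).1 ≡ pellU k [ZMOD m] ∧ (pvFD m k).2 ≡ pellU (k + 1) [ZMOD m] := by
  induction N using Nat.strong_induction_on with
  | _ N ih =>
    intro k hk
    rw [pvFD]
    split_ifs with h0 hodd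
    · subst h0; constructor <;> simp [pellU]
    · -- k odd: k = 2*(k/2) + 1
      obtain ⟨ha, hb⟩ := ih (k / 2) (by omega) (k / 2) rfl
      have hc : PySem.Int.mod (2 * (pvFD m (k / 2)).1 *
          ((pvFD m (k / 2)).2 - (pvFD m (k / 2)).1)) m ≡ pellU (k / 2 + k / 2) [ZMOD m] := by
        refine (pymod_modEq _ _).trans ?_
        rw [pellU_add]
        exact Int.ModEq.trans (((Int.ModEq.refl 2).mul ha).mul (hb.sub ha))
          (by rw [show (2 : Int) * pellU (k / 2) * (pellU (k / 2 + 1) - pellU (k / 2)) =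
            pellU (k / 2 + 1) * pellU (k / 2) +
            pellU (k / 2) * (pellU (k / 2 + 1) - 2 * pellU (k / 2)) by ring])
      have hd : PySem.Int.mod ((pvFD m (k / 2)).1 * (pvFD m (k / 2)).1 +
          (pvFD m (k / 2)).2 * (pvFD m (k / 2)).2) m ≡ pellU (k / 2 + k / 2 + 1) [ZMOD m] := by
        refine (pymod_modEq _ _).trans ?_
        rw [pellU_add_one]
        exact Int.ModEq.trans ((ha.mul ha).add (hb.mul hb))
          (by rw [show pellU (k / 2) * pellU (k / 2) + pellU (k / 2 + 1) * pellU (k / 2 + 1) =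
            pellU (k / 2 + 1) * pellU (k / 2 + 1) + pellU (k / 2) * pellU (k / 2) by ring])
      have hk1 : k / 2 + k / 2 + 1 = k := by omega
      rw [hk1] at hd
      refine ⟨hd, ?_⟩
      refine (pymod_modEq _ _).trans ?_
      have hk2 : k + 1 = (k / 2 + k / 2) + 2 := by omega
      rw [hk2, pellU, show k / 2 + k / 2 + 1 = k from hk1]
      exact ((Int.ModEq.refl 2).mul hd).add hc
    · -- k even, k ≠ 0: k = 2*(k/2)
      obtain ⟨ha, hb⟩ := ih (k / 2) (by omega) (k / 2) rfl
      have hk0 : k / 2 + k / 2 = k := by omega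
      constructor
      · refine (pymod_modEq _ _).trans ?_
        conv_rhs => rw [← hk0]
        rw [pellU_add]
        exact Int.ModEq.trans (((Int.ModEq.refl 2).mul ha).mul (hb.sub ha))
          (by rw [show (2 : Int) * pellU (k / 2) * (pellU (k / 2 + 1) - pellU (k / 2)) =
            pellU (k / 2 + 1) * pellU (k / 2) +
            pellU (k / 2) * (pellU (k / 2 + 1) - 2 * pellU (k / 2)) by ring])
      · refine (pymod_modEq _ _).trans ?_
        conv_rhs => rw [← hk0]
        rw [pellU_add_one]
        exact Int.ModEq.trans ((ha.mul ha).add (hb.mul hb))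
          (by rw [show pellU (k / 2) * pellU (k / 2) + pellU (k / 2 + 1) * pellU (k / 2 + 1) =
            pellU (k / 2 + 1) * pellU (k / 2 + 1) + pellU (k / 2) * pellU (k / 2) by ring])

-- ===== VERDICT (by name: the statement is the Claim_ definition above) =====
theorem U_mod_spec : Claim_equal_U_mod := by
  intro n m _ hpre
  unfold Spec_U_mod U_mod U_mod_alt
  split_ifs with hg
  · rfl
  · push Not at hg
    obtain ⟨hm1, hn⟩ := hg
    have ha := aloop_spec m (n - 1).toNat (n - 1) rfl
      ((1, 0), (0, 1)) ((2, 1), (1, 0)) ((1, 0), (0, 1)) ((2, 1), (1, 0))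
      (MCong_refl m _) (MCong_refl m _)
    rw [one_matMul, matPow_pell] at ha
    have hA : (pvALoop m ((1, 0), (0, 1)) ((2, 1), (1, 0)) (n - 1)).1.1
        ≡ pellU ((n - 1).toNat + 1) [ZMOD m] := ha.1
    have hB : (pvFD m n.toNat).1 ≡ pellU n.toNat [ZMOD m] := (fd_spec m n.toNat n.toNat rfl).1
    have hidx : (n - 1).toNat + 1 = n.toNat := by omega
    rw [hidx] at hA
    exact pymod_congr (hA.trans hB.symm)
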